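-- pv_equiv track=rewrite | github.com/TrinhThanh-25/Travel-App-Server | python_chatbot/core/itinerary.py | _select_pois_for_days
-- ===== SOURCE A (Python) =====
-- from typing import Dict, List
--
-- def _select_pois_for_days(pois: List[Dict], days: int, max_per_day: int = 6):
--     pois = sorted(pois, key=lambda x: x.get("final", 0), reverse=True)
--     k = min(len(pois), days * max_per_day)
--     chosen = pois[:k]
--     per_day = []
--     for d in range(days):
--         per_day.append(chosen[d::days][:max_per_day])
--     return per_day
-- ===== SOURCE B (Python) =====
-- from typing import Dict, List
--
-- def _select_pois_for_days(pois: List[Dict], days: int, max_per_day: int = 6):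
--     ranked = sorted(pois, key=lambda x: x.get("final", 0), reverse=True)
--     if days <= 0:
--         return []
--     chosen = ranked[:min(len(ranked), days * max_per_day)]
--     per_day = [[] for _ in range(days)]
--     for i, poi in enumerate(chosen):
--         per_day[i % days].append(poi)
--     return [bucket[:max_per_day] for bucket in per_day]
-- ===== Notes on version B (the rewrite author's own statement) =====
-- stated objective: alternative
-- what changed: The per-day strided slicing chosen[d::days] inside a loop is replaced by a single round-robin dealing pass that appends each chosen POI to bucket i % days, with the per-bucket cap applied once at the end.
import Mathlib
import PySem

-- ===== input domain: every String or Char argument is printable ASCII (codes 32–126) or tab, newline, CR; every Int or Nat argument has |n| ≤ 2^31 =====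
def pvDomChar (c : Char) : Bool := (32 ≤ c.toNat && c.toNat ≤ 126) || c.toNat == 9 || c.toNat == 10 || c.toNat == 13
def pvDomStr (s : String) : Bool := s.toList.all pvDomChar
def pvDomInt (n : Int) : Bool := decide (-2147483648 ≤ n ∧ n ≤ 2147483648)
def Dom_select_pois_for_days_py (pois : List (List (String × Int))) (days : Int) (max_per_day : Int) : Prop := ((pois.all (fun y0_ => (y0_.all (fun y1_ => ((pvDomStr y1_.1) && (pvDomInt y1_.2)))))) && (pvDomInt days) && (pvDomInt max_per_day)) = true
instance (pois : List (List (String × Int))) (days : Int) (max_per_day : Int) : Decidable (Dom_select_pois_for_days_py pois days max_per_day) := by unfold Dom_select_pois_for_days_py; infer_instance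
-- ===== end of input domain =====

-- B replaces the per-day strided slices chosen[d::days] by one round-robin dealing pass
-- (append POI i to bucket i % days), capping each bucket once at the end: an alternative
-- decomposition of the same cost.

-- ===== PORT A =====
-- literal transliteration of _select_pois_for_days (Source A)
def select_pois_for_days_py (pois : List (List (String × Int))) (days : Int) (max_per_day : Int) : List (List (List (String × Int))) :=
  let ps := PySem.List.sorted pois (fun x => PySem.Dict.getD ⟨x⟩ "final" (0 : Int)) true
  let k : Int := min ((ps.length : Int)) (days * max_per_day)
  let chosen := PySem.List.slice ps none (some k)
  -- chosen[d::days]: inside the loop d ∈ range(days) forces days ≥ 1, so step ≠ 0 and slice? is some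
  (PySem.List.pyRange 0 days 1).foldl
    (fun acc d =>
      acc ++ [PySem.List.slice ((PySem.List.slice? chosen (some d) none days).getD []) none (some max_per_day)])
    []

-- ===== PORT B =====
-- literal transliteration of Source B: sort, guard days ≤ 0, deal round-robin, cap each bucket
def select_pois_for_days_py_alt (pois : List (List (String × Int))) (days : Int) (max_per_day : Int) : List (List (List (String × Int))) :=
  let ranked := PySem.List.sorted pois (fun x => PySem.Dict.getD ⟨x⟩ "final" (0 : Int)) true
  if days ≤ 0 then []
  else
    let chosen := PySem.List.slice ranked none (some (min ((ranked.length : Int)) (days * max_per_day)))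
    let per_day : List (List (List (String × Int))) := (PySem.List.pyRange 0 days 1).map (fun _ => [])
    -- per_day[i % days].append(poi): i ≥ 0 and days > 0 here, so (i % days).toNat is exact
    let dealt := (PySem.List.enumerate chosen 0).foldl
      (fun pd ix => pd.modify ((PySem.Int.mod ix.1 days).toNat) (· ++ [ix.2])) per_day
    dealt.map (fun bucket => PySem.List.slice bucket none (some max_per_day))

-- ===== PRECONDITION & SPEC =====
def Spec_select_pois_for_days_py (pois : List (List (String × Int))) (days : Int) (max_per_day : Int) (out : List (List (List (String × Int)))) : Prop := out = select_pois_for_days_py_alt pois days max_per_day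
instance (pois : List (List (String × Int))) (days : Int) (max_per_day : Int) (out : List (List (List (String × Int)))) : Decidable (Spec_select_pois_for_days_py pois days max_per_day out) := by unfold Spec_select_pois_for_days_py; infer_instance

-- ===== CLAIM (what is proved, stated in full; the proofs are below) =====
def Claim_equal_select_pois_for_days_py : Prop := ∀ (pois : List (List (String × Int))) (days : Int) (max_per_day : Int), Dom_select_pois_for_days_py pois days max_per_day → Spec_select_pois_for_days_py pois days max_per_day (select_pois_for_days_py pois days max_per_day)

-- ===== LEMMAS AND PROOFS =====

-- every D-th element of xs (indices 0, D, 2D, …)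
def pvStride {α : Type} : List α → Nat → List α
  | [], _ => []
  | x :: r, D => x :: pvStride (r.drop (D - 1)) D
termination_by xs _ => xs.length
decreasing_by simp only [List.length_drop, List.length_cons]; omega

theorem pvStride_nil {α : Type} (D : Nat) : pvStride ([] : List α) D = [] := by
  simp [pvStride]

theorem pvStride_cons {α : Type} (x : α) (r : List α) (D : Nat) :
    pvStride (x :: r) D = x :: pvStride (r.drop (D - 1)) D := by
  simp [pvStride]

-- the strided selection as a filterMap over counters, shifted by d
theorem pvStride_filterMap {α : Type} (D : Nat) (hD : 0 < D) :
    ∀ (m d : Nat) (xs : List α), xs.length ≤ d + D * m →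
      (List.range m).filterMap (fun k => xs[d + D * k]?) = pvStride (xs.drop d) D := by
  intro m
  induction m with
  | zero =>
      intro d xs h
      have hnil : xs.drop d = [] := List.drop_eq_nil_of_le (by omega)
      simp [hnil, pvStride_nil]
  | succ m ih =>
      intro d xs h
      rw [List.range_succ_eq_map, List.filterMap_cons]
      have hidx : ∀ k, d + D * Nat.succ k = (d + D) + D * k := by intro k; rw [Nat.mul_succ]; omega
      have htail :
          (List.map Nat.succ (List.range m)).filterMap (fun k => xs[d + D * k]?)
            = pvStride (xs.drop (d + D)) D := by
        rw [List.filterMap_map]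
        have : ((fun k => xs[d + D * k]?) ∘ Nat.succ) = fun k => xs[(d + D) + D * k]? := by
          funext k; simp only [Function.comp_apply, hidx]
        rw [this, ih (d + D) xs (by rw [Nat.mul_succ] at h; omega)]
      have hz : d + D * 0 = d := by ring
      by_cases hd : d < xs.length
      · rw [show xs[d + D * 0]? = some xs[d] by rw [hz]; exact List.getElem?_eq_getElem hd]
        rw [← List.getElem_cons_drop hd, pvStride_cons, List.drop_drop,
          show d + 1 + (D - 1) = d + D by omega]
        simp [htail]
      · rw [show xs[d + D * 0]? = none by rw [hz]; exact List.getElem?_eq_none (by omega)]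
        have h1 : xs.drop d = [] := List.drop_eq_nil_of_le (by omega)
        have h2 : xs.drop (d + D) = [] := List.drop_eq_nil_of_le (by omega)
        simp [htail, h1, h2, pvStride_nil]

-- chosen[d::days] for 0 ≤ d < days is the D-stride of chosen.drop d
theorem sliceA_eq_pvStride {α : Type} (xs : List α) (d days : Int) (h0 : 0 ≤ d) (hd : d < days) :
    (PySem.List.slice? xs (some d) none days).getD []
      = pvStride (xs.drop d.toNat) days.toNat := by
  have hdays : 0 < days := lt_of_le_of_lt h0 hd
  have hsi : PySem.List.sliceIndices xs.length (some d) none days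
      = (min d (xs.length : Int), (xs.length : Int), days) := by
    unfold PySem.List.sliceIndices
    simp only [if_neg (show ¬ days < 0 by omega), if_neg (show ¬ d < 0 by omega)]
  rw [PySem.List.slice?, if_neg (show ¬ days = 0 by omega), hsi]
  dsimp only
  rw [if_pos hdays]
  obtain ⟨dn, rfl⟩ : ∃ dn : Nat, d = (dn : Int) := ⟨d.toNat, (Int.toNat_of_nonneg h0).symm⟩
  obtain ⟨Dn, rfl⟩ : ∃ Dn : Nat, days = (Dn : Int) :=
    ⟨days.toNat, (Int.toNat_of_nonneg (by omega)).symm⟩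
  have hDn : 0 < Dn := by exact_mod_cast hdays
  by_cases hlt : (dn : Int) < (xs.length : Int)
  · rw [min_eq_left (by omega), if_pos hlt]
    have hix : ∀ k : Nat, (((dn : Int) + (Dn : Int) * (k : Int))).toNat = dn + Dn * k := by
      intro k
      rw [show ((dn : Int) + (Dn : Int) * (k : Int)) = ((dn + Dn * k : Nat) : Int) from by
        push_cast; ring, Int.toNat_natCast]
    simp only [hix, Int.toNat_natCast]
    have hq0 : 0 ≤ ((xs.length : Int) - (dn : Int) + (Dn : Int) - 1) / (Dn : Int) :=
      Int.ediv_nonneg (by omega) (by omega)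
    have hid := Int.mul_ediv_add_emod ((xs.length : Int) - (dn : Int) + (Dn : Int) - 1) (Dn : Int)
    have hr0 := Int.emod_nonneg ((xs.length : Int) - (dn : Int) + (Dn : Int) - 1)
      (show ((Dn : Int)) ≠ 0 by omega)
    have hr1 := Int.emod_lt_of_pos ((xs.length : Int) - (dn : Int) + (Dn : Int) - 1)
      (show (0 : Int) < (Dn : Int) by omega)
    exact pvStride_filterMap Dn hDn _ dn xs (by zify [Int.toNat_of_nonneg hq0]; omega)
  · rw [min_eq_right (by omega), if_neg (by omega)]
    have h1 : List.drop dn xs = [] := List.drop_eq_nil_of_le (by omega)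
    simp [h1, pvStride]

-- arithmetic of a % b for a positive variable divisor (omega only handles literal divisors)
theorem pvEmodKey {b j s : Int} (h0 : 0 ≤ j) (hj : j < b) :
    (j - s) % b = 0 ↔ s % b = j := by
  rw [← Int.emod_eq_emod_iff_emod_sub_eq_zero, Int.emod_eq_of_lt h0 hj]
  exact eq_comm

theorem pvEmodSubOne {a b : Int} (hb : 0 < b) (h : a % b ≠ 0) : (a - 1) % b = a % b - 1 := by
  have h0 := Int.emod_nonneg a (ne_of_gt hb)
  have h1 := Int.emod_lt_of_pos a hb
  calc (a - 1) % b = ((a % b - 1) + b * (a / b)) % b := by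
        rw [show (a % b - 1) + b * (a / b) = a - 1 from by
          have := Int.mul_ediv_add_emod a b; omega]
      _ = (a % b - 1) % b := by rw [Int.add_mul_emod_self_left]
      _ = a % b - 1 := Int.emod_eq_of_lt (by omega) (by omega)

theorem pvEmodSubOneZero {a b : Int} (hb : 0 < b) (h : a % b = 0) : (a - 1) % b = b - 1 := by
  calc (a - 1) % b = ((b - 1) + b * (a / b - 1)) % b := by
        rw [show (b - 1) + b * (a / b - 1) = a - 1 from by
          have h1 := Int.mul_ediv_add_emod a b
          have h2 : b * (a / b - 1) = b * (a / b) - b := by ring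
          omega]
      _ = (b - 1) % b := by rw [Int.add_mul_emod_self_left]
      _ = b - 1 := Int.emod_eq_of_lt (by omega) (by omega)

-- dealing preserves the number of buckets
theorem length_foldl_modify {α β : Type} (idx : β → Nat) (upd : β → List α → List α) :
    ∀ (l : List β) (pd : List (List α)),
      (l.foldl (fun pd b => pd.modify (idx b) (upd b)) pd).length = pd.length := by
  intro l
  induction l with
  | nil => intro pd; rfl
  | cons b t ih => intro pd; rw [List.foldl_cons, ih, List.length_modify]

-- round-robin dealing: bucket j receives exactly the stride starting at offset (j - s) mod D
theorem deal_getD {α : Type} (D : Nat) (hD : 0 < D) :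
    ∀ (xs : List α) (s : Int) (pd : List (List α)), pd.length = D → ∀ j : Nat, j < D →
      ((PySem.List.enumerate xs s).foldl
          (fun pd ix => pd.modify ((PySem.Int.mod ix.1 (D : Int)).toNat) (· ++ [ix.2])) pd).getD j []
        = pd.getD j [] ++ pvStride (xs.drop (((j : Int) - s) % (D : Int)).toNat) D := by
  intro xs
  induction xs with
  | nil => intro s pd hpd j hj; simp [PySem.List.enumerate, pvStride_nil]
  | cons x rest ih =>
      intro s pd hpd j hj
      have hDZ : (0 : Int) < (D : Int) := by exact_mod_cast hD
      have hmod : PySem.Int.mod s (D : Int) = s % (D : Int) := by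
        show s.fmod (D : Int) = _
        rw [Int.fmod_eq_emod, if_pos (Or.inl (le_of_lt hDZ)), add_zero]
      rw [show PySem.List.enumerate (x :: rest) s = (s, x) :: PySem.List.enumerate rest (s + 1)
            from by simp [PySem.List.enumerate]]
      rw [List.foldl_cons]
      rw [ih (s + 1) _ (by rw [List.length_modify]; exact hpd) j hj]
      have hjI : (j : Int) < (D : Int) := by exact_mod_cast hj
      have h0j : (0 : Int) ≤ (j : Int) := by positivity
      have hkey := pvEmodKey (s := s) (b := (D : Int)) h0j hjI
      by_cases hcase : ((j : Int) - s) % (D : Int) = 0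
      · have hs : s % (D : Int) = (j : Int) := hkey.mp hcase
        have hidx : (PySem.Int.mod s (D : Int)).toNat = j := by rw [hmod, hs]; omega
        have hjlen : j < pd.length := by omega
        have hgetD : (pd.modify j (· ++ [x])).getD j [] = pd.getD j [] ++ [x] := by
          simp [List.getD_eq_getElem?_getD, List.getElem?_eq_getElem hjlen]
        have hprev : (((j : Int) - (s + 1)) % (D : Int)).toNat = D - 1 := by
          rw [show (j : Int) - (s + 1) = ((j : Int) - s) - 1 from by ring,
            pvEmodSubOneZero hDZ hcase]
          omega
        rw [hidx, hgetD, hcase, hprev]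
        simp only [Int.toNat_zero, List.drop_zero, pvStride_cons, List.append_assoc,
          List.singleton_append]
      · have hs : s % (D : Int) ≠ (j : Int) := fun h => hcase (hkey.mpr h)
        have hnn := Int.emod_nonneg s (ne_of_gt hDZ)
        have hidx : (PySem.Int.mod s (D : Int)).toNat ≠ j := by rw [hmod]; omega
        have hgetD : (pd.modify (PySem.Int.mod s (D : Int)).toNat (· ++ [x])).getD j []
            = pd.getD j [] := by
          simp [List.getD_eq_getElem?_getD, hidx]
        rw [hgetD]
        have hnn2 := Int.emod_nonneg ((j : Int) - s) (ne_of_gt hDZ)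
        have harith : (((j : Int) - s) % (D : Int)).toNat
            = (((j : Int) - (s + 1)) % (D : Int)).toNat + 1 := by
          rw [show (j : Int) - (s + 1) = ((j : Int) - s) - 1 from by ring,
            pvEmodSubOne hDZ hcase]
          omega
        rw [harith, List.drop_succ_cons]

-- ===== VERDICT (by name: the statement is the Claim_ definition above) =====
theorem select_pois_for_days_py_spec : Claim_equal_select_pois_for_days_py := by
  unfold Claim_equal_select_pois_for_days_py
  intro pois days mpd _
  unfold Spec_select_pois_for_days_py select_pois_for_days_py select_pois_for_days_py_alt
  by_cases hdays : days ≤ 0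
  · rw [if_pos hdays]
    rw [PySem.List.pyRange_one_eq_nil hdays]
    rfl
  · rw [if_neg hdays]
    obtain ⟨Dn, rfl⟩ : ∃ n : Nat, days = (n : Int) :=
      ⟨days.toNat, (Int.toNat_of_nonneg (by omega)).symm⟩
    have hDn : 0 < Dn := by exact_mod_cast show (0 : Int) < (Dn : Int) by omega
    dsimp only
    rw [PySem.List.foldl_append_singleton_eq_map, List.nil_append]
    set ps := PySem.List.sorted pois (fun x => PySem.Dict.getD ⟨x⟩ "final" (0 : Int)) true with hps
    set chosen := PySem.List.slice ps none (some (min ((ps.length : Int)) ((Dn : Int) * mpd)))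
      with hch
    set per_day : List (List (List (String × Int))) :=
      (PySem.List.pyRange 0 (Dn : Int) 1).map (fun _ => []) with hpd
    have hpdlen : per_day.length = Dn := by
      rw [hpd, List.length_map, PySem.List.length_pyRange_one]; omega
    set dealt := (PySem.List.enumerate chosen 0).foldl
      (fun pd ix => pd.modify ((PySem.Int.mod ix.1 (Dn : Int)).toNat) (· ++ [ix.2])) per_day
      with hde
    have hdlen : dealt.length = Dn := by
      rw [hde, length_foldl_modify
        (fun ix : Int × List (String × Int) => (PySem.Int.mod ix.1 (Dn : Int)).toNat)
        (fun (ix : Int × List (String × Int)) (b : List (List (String × Int))) => b ++ [ix.2]),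
        hpdlen]
    apply List.ext_getElem
    · simp [PySem.List.length_pyRange_one, hdlen]
    · intro j h1 h2
      have hj2 : j < Dn := by
        rw [List.length_map, PySem.List.length_pyRange_one] at h1; omega
      simp only [List.getElem_map]
      rw [PySem.List.getElem_pyRange_one]
      congr 1
      rw [show (0 : Int) + (j : Int) = ((j : Nat) : Int) from by ring]
      rw [sliceA_eq_pvStride chosen (j : Int) ((Dn : Nat) : Int) (by positivity)
        (by exact_mod_cast hj2)]
      have hjd : j < dealt.length := by omega
      rw [show dealt[j] = dealt.getD j [] from (List.getD_eq_getElem dealt [] hjd).symm]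
      rw [hde, deal_getD Dn hDn chosen 0 per_day hpdlen j hj2]
      have hmj : (((j : Int) - 0) % ((Dn : Nat) : Int)).toNat = j := by
        rw [sub_zero, Int.emod_eq_of_lt (by positivity) (by exact_mod_cast hj2)]
        omega
      have hpe : per_day.getD j [] = [] := by
        have hgen : ∀ (l : List Int) (i : Nat),
            (l.map (fun _ => ([] : List (List (String × Int))))).getD i [] = [] := by
          intro l i
          rw [List.getD_eq_getElem?_getD, List.getElem?_map]
          cases l[i]? <;> rfl
        rw [hpd]
        exact hgen _ j
      rw [hmj, hpe, List.nil_append, Int.toNat_natCast, Int.toNat_natCast]
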